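-- pv_equiv track=rewrite | github.com/Zenvila/Zenvila.github.io | migrate_final.py | get_featured_image
-- ===== SOURCE A (Python) =====
-- def get_featured_image(title, content):
--     """Generate featured image URL based on title and content"""
--     title_lower = title.lower()
--     content_lower = content.lower()
--
--     # Check for Linux-related content
--     if any(keyword in title_lower or keyword in content_lower for keyword in ['linux', 'arch', 'ubuntu', 'debian', 'kernel', 'systemd']):
--         return "https://source.unsplash.com/1600x900/?linux,server"
--
--     # Check for Docker/Kubernetes
--     if any(keyword in title_lower or keyword in content_lower for keyword in ['docker', 'kubernetes', 'container', 'swarm']):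
--         return "https://source.unsplash.com/1600x900/?docker,container"
--
--     # Check for AI/ML
--     if any(keyword in title_lower or keyword in content_lower for keyword in ['ai', 'machine learning', 'neural', 'tensorflow', 'pytorch', 'ml']):
--         return "https://source.unsplash.com/1600x900/?ai,machine-learning"
--
--     # Check for networking
--     if any(keyword in title_lower or keyword in content_lower for keyword in ['network', 'ssh', 'ftp', 'http', 'tcp', 'ip']):
--         return "https://source.unsplash.com/1600x900/?network,server"
--
--     # Default tech/coding image
--     return "https://source.unsplash.com/1600x900/?tech,coding"
-- ===== SOURCE B (Python) =====
-- # B: flatten all keywords into (keyword, priority) pairs, take the MINIMUM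
-- # matching priority over an exhaustive scan (no ordered early-return cascade),
-- # and index the URL table with it; the default image sits at the last slot.
-- URLS = [
--     "https://source.unsplash.com/1600x900/?linux,server",
--     "https://source.unsplash.com/1600x900/?docker,container",
--     "https://source.unsplash.com/1600x900/?ai,machine-learning",
--     "https://source.unsplash.com/1600x900/?network,server",
--     "https://source.unsplash.com/1600x900/?tech,coding",
-- ]
--
-- KEYWORDS = (
--     [(kw, 0) for kw in ['linux', 'arch', 'ubuntu', 'debian', 'kernel', 'systemd']]
--     + [(kw, 1) for kw in ['docker', 'kubernetes', 'container', 'swarm']]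
--     + [(kw, 2) for kw in ['ai', 'machine learning', 'neural', 'tensorflow', 'pytorch', 'ml']]
--     + [(kw, 3) for kw in ['network', 'ssh', 'ftp', 'http', 'tcp', 'ip']]
-- )
--
--
-- def get_featured_image(title, content):
--     """Generate featured image URL based on title and content"""
--     title_lower = title.lower()
--     content_lower = content.lower()
--     best = min(
--         (cat for kw, cat in KEYWORDS if kw in title_lower or kw in content_lower),
--         default=len(URLS) - 1,
--     )
--     return URLS[best]
-- ===== Notes on version B (the rewrite author's own statement) =====
-- stated objective: alternative
-- what changed: Replaced A's ordered early-return cascade of four any()-branches by an exhaustive scan of a flat (keyword, priority) list that reduces to the minimum matching priority and indexes a URL table with it.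
import Mathlib
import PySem

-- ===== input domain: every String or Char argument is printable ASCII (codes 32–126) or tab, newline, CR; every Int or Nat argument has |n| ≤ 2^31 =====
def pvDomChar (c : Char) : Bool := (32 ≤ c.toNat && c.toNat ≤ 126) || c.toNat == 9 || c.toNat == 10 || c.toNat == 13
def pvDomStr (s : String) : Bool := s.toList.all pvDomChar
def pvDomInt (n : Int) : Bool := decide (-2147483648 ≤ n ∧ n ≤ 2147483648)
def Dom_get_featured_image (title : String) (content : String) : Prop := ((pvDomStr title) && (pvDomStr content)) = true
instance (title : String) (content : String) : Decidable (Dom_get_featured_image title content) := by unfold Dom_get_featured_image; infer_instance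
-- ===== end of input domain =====

-- B replaces A's ordered early-return cascade by a min-reduction over a flat (keyword, priority) list indexing a URL table (alternative algorithm; same results).


-- ===== PORT A =====
def get_featured_image (title : String) (content : String) : String :=
  let title_lower := PySem.Str.lower title
  let content_lower := PySem.Str.lower content
  if ["linux", "arch", "ubuntu", "debian", "kernel", "systemd"].any
      (fun kw => PySem.Str.isIn kw title_lower || PySem.Str.isIn kw content_lower) then
    "https://source.unsplash.com/1600x900/?linux,server"
  else if ["docker", "kubernetes", "container", "swarm"].any
      (fun kw => PySem.Str.isIn kw title_lower || PySem.Str.isIn kw content_lower) then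
    "https://source.unsplash.com/1600x900/?docker,container"
  else if ["ai", "machine learning", "neural", "tensorflow", "pytorch", "ml"].any
      (fun kw => PySem.Str.isIn kw title_lower || PySem.Str.isIn kw content_lower) then
    "https://source.unsplash.com/1600x900/?ai,machine-learning"
  else if ["network", "ssh", "ftp", "http", "tcp", "ip"].any
      (fun kw => PySem.Str.isIn kw title_lower || PySem.Str.isIn kw content_lower) then
    "https://source.unsplash.com/1600x900/?network,server"
  else
    "https://source.unsplash.com/1600x900/?tech,coding"

-- ===== PORT B =====
def pvUrls : List String :=
  ["https://source.unsplash.com/1600x900/?linux,server",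
   "https://source.unsplash.com/1600x900/?docker,container",
   "https://source.unsplash.com/1600x900/?ai,machine-learning",
   "https://source.unsplash.com/1600x900/?network,server",
   "https://source.unsplash.com/1600x900/?tech,coding"]

-- Source B's KEYWORDS: the four keyword groups tagged with their priority, concatenated flat
def pvKeywords : List (String × Nat) :=
  (["linux", "arch", "ubuntu", "debian", "kernel", "systemd"].map (fun kw => (kw, 0)))
  ++ (["docker", "kubernetes", "container", "swarm"].map (fun kw => (kw, 1)))
  ++ (["ai", "machine learning", "neural", "tensorflow", "pytorch", "ml"].map (fun kw => (kw, 2)))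
  ++ (["network", "ssh", "ftp", "http", "tcp", "ip"].map (fun kw => (kw, 3)))

-- Source B's min(gen, default=len(URLS)-1) is this left fold over the filtered priorities;
-- URLS[best] is total since best ≤ 4 < |URLS|, ported as getD.
def get_featured_image_alt (title : String) (content : String) : String :=
  let title_lower := PySem.Str.lower title
  let content_lower := PySem.Str.lower content
  let best := pvKeywords.foldl
    (fun acc p =>
      if PySem.Str.isIn p.1 title_lower || PySem.Str.isIn p.1 content_lower then min acc p.2
      else acc)
    (pvUrls.length - 1)
  pvUrls.getD best ""

-- ===== PRECONDITION & SPEC =====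
def Spec_get_featured_image (title : String) (content : String) (out : String) : Prop := out = get_featured_image_alt title content
instance (title : String) (content : String) (out : String) : Decidable (Spec_get_featured_image title content out) := by unfold Spec_get_featured_image; infer_instance

-- ===== CLAIM (what is proved, stated in full; the proofs are below) =====
def Claim_equal_get_featured_image : Prop := ∀ (title : String) (content : String), Dom_get_featured_image title content → Spec_get_featured_image title content (get_featured_image title content)

-- ===== LEMMAS AND PROOFS =====

-- the fold over one priority group: updates acc to min acc c exactly when some keyword matches
theorem pv_fold_group (p : String → Bool) (kws : List String) (c acc : Nat) :
    (kws.map (fun kw => (kw, c))).foldl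
      (fun acc q => if p q.1 then min acc q.2 else acc) acc
    = if kws.any p then min acc c else acc := by
  induction kws generalizing acc with
  | nil => simp
  | cons k rest ih =>
    simp only [List.map, List.foldl, List.any_cons]
    by_cases hk : p k = true
    · simp [hk, ih]
    · simp [hk, ih]

-- A's cascade equals B's min-fold-then-index, for any keyword predicate p
theorem pv_main (p : String → Bool) :
    (if (["linux", "arch", "ubuntu", "debian", "kernel", "systemd"]).any p then
      "https://source.unsplash.com/1600x900/?linux,server"
    else if (["docker", "kubernetes", "container", "swarm"]).any p then
      "https://source.unsplash.com/1600x900/?docker,container"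
    else if (["ai", "machine learning", "neural", "tensorflow", "pytorch", "ml"]).any p then
      "https://source.unsplash.com/1600x900/?ai,machine-learning"
    else if (["network", "ssh", "ftp", "http", "tcp", "ip"]).any p then
      "https://source.unsplash.com/1600x900/?network,server"
    else
      "https://source.unsplash.com/1600x900/?tech,coding")
    = pvUrls.getD
        (pvKeywords.foldl (fun acc q => if p q.1 then min acc q.2 else acc) (pvUrls.length - 1)) "" := by
  unfold pvKeywords
  rw [List.foldl_append, List.foldl_append, List.foldl_append,
      pv_fold_group, pv_fold_group, pv_fold_group, pv_fold_group]
  by_cases h0 : (["linux", "arch", "ubuntu", "debian", "kernel", "systemd"]).any p = true <;>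
  by_cases h1 : (["docker", "kubernetes", "container", "swarm"]).any p = true <;>
  by_cases h2 : (["ai", "machine learning", "neural", "tensorflow", "pytorch", "ml"]).any p = true <;>
  by_cases h3 : (["network", "ssh", "ftp", "http", "tcp", "ip"]).any p = true <;>
  simp [h0, h1, h2, h3, pvUrls]

-- ===== VERDICT (by name: the statement is the Claim_ definition above) =====
theorem get_featured_image_spec : Claim_equal_get_featured_image := by
  intro title content _
  exact pv_main
    (fun kw => PySem.Str.isIn kw (PySem.Str.lower title) || PySem.Str.isIn kw (PySem.Str.lower content))
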